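-- pv_equiv track=rewrite | github.com/hannaheptapod/atco | AR/typical90/067/main.py | octnovoct
-- ===== SOURCE A (Python) =====
-- def octnovoct(n):
--     s_nov = str()
--     for _ in range(20):
--         tmp = n % 9
--         if tmp == 8:
--             tmp = 5
--         s_nov = str(tmp) + s_nov
--         if n < 9:
--             break
--         else:
--             n = n // 9
--     n_nov = int(s_nov, 8)
--     return n_nov
-- ===== SOURCE B (Python) =====
-- def octnovoct(n):
--     def digits9(m):
--         if m < 9:
--             return [m % 9]
--         return digits9(m // 9) + [m % 9]
--     ds = [5 if d == 8 else d for d in digits9(n)]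
--     return sum(d * 8 ** i for i, d in enumerate(reversed(ds)))
-- ===== Notes on version B (the rewrite author's own statement) =====
-- stated objective: alternative
-- what changed: B replaces A's fused fuel-capped loop that prepends digit characters to a string and then parses that string in base eight by a three-stage pipeline: recursive base-nine digit extraction, a comprehension remapping the top digit, and a positional weighted sum over the enumerated reversed digit list.
import Mathlib
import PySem

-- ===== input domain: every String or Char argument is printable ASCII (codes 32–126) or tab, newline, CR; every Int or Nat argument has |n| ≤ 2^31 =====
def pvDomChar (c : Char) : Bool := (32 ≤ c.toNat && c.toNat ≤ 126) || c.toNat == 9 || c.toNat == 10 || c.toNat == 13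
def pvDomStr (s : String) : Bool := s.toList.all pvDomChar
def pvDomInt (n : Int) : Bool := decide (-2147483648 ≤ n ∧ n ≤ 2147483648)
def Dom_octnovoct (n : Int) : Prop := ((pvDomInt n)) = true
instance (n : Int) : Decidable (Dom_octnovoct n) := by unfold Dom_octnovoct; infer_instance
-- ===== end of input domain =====

-- B replaces A's fused capped string-building loop plus int(s,8) parse by a three-stage
-- pipeline: recursive base-9 digit extraction, a remapping pass, and a positional
-- sum of d*8^i over the enumerated reversed digit list (alternative decomposition).

-- ===== PORT A =====
-- hand port of int(s, 8): exact on strings made only of octal digit chars '0'..'7',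
-- which is all this program ever feeds it
def pvOctStep (a : Int) (c : Char) : Int := a * 8 + ((c.toNat : Int) - 48)
def pvParseOct (s : String) : Int := s.toList.foldl pvOctStep 0

def pvALoop : Nat → Int → String → String
  | 0, _, s => s
  | f+1, n, s =>
    let tmp := PySem.Int.mod n 9
    let tmp := if tmp = 8 then (5 : Int) else tmp
    let s := PySem.Int.toStr tmp ++ s
    if n < 9 then s else pvALoop f (PySem.Int.floordiv n 9) s

def octnovoct (n : Int) : Int := pvParseOct (pvALoop 20 n "")

-- ===== PORT B =====
-- termination: for 9 ≤ n, n // 9 (with positive divisor, = n / 9) strictly shrinks n.toNat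
lemma pvDigits9_dec (n : Int) (h : ¬ n < 9) :
    (PySem.Int.floordiv n 9).toNat < n.toNat := by
  rw [PySem.Int.floordiv_eq_ediv_of_pos (by norm_num)]
  have h1 : (1:Int) ≤ n / 9 := by
    rw [Int.le_ediv_iff_mul_le (by norm_num)]; omega
  have h2 : n / 9 * 9 ≤ n := Int.ediv_mul_le n (by norm_num)
  have h3 : n / 9 < n := by linarith
  omega

-- stage 1: recursive base-9 digit extraction, most significant first
def pvDigits9 (n : Int) : List Int :=
  if h : n < 9 then [PySem.Int.mod n 9]
  else pvDigits9 (PySem.Int.floordiv n 9) ++ [PySem.Int.mod n 9]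
termination_by n.toNat
decreasing_by exact pvDigits9_dec n h

def octnovoct_alt (n : Int) : Int :=
  let ds := (pvDigits9 n).map (fun d => if d = 8 then (5 : Int) else d)
  ((PySem.List.enumerate ds.reverse 0).map (fun p => p.2 * 8 ^ p.1.toNat)).sum

-- ===== PRECONDITION & SPEC =====
def Spec_octnovoct (n : Int) (out : Int) : Prop := out = octnovoct_alt n
instance (n : Int) (out : Int) : Decidable (Spec_octnovoct n out) := by unfold Spec_octnovoct; infer_instance

-- ===== CLAIM (what is proved, stated in full; the proofs are below) =====
def Claim_equal_octnovoct : Prop := ∀ (n : Int), Dom_octnovoct n → Spec_octnovoct n (octnovoct n)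

-- ===== LEMMAS AND PROOFS =====

-- the sequence of remapped digits produced by A's loop, most significant first
def pvDigs : Nat → Int → List Int
  | 0, _ => []
  | f+1, n =>
    let tmp := PySem.Int.mod n 9
    let tmp := if tmp = 8 then (5 : Int) else tmp
    if n < 9 then [tmp] else pvDigs f (PySem.Int.floordiv n 9) ++ [tmp]

def pvDChar (t : Int) : Char := Char.ofNat (48 + t.toNat)

-- most-significant-first Horner value in base 8
def pvOctVal (l : List Int) : Int := l.foldl (fun a t => a * 8 + t) 0

-- least-significant-first polynomial value in base 8
def pvPoly : List Int → Int
  | [] => 0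
  | d :: l => d + 8 * pvPoly l

lemma pvTmp_bounds (n : Int) :
    0 ≤ (if PySem.Int.mod n 9 = 8 then (5 : Int) else PySem.Int.mod n 9) ∧
    (if PySem.Int.mod n 9 = 8 then (5 : Int) else PySem.Int.mod n 9) < 8 := by
  have h := PySem.Int.mod_eq_emod_of_pos (a := n) (b := 9) (by norm_num)
  have h1 := Int.emod_nonneg n (b := 9) (by norm_num)
  have h2 := Int.emod_lt_of_pos n (b := 9) (by norm_num)
  split_ifs with hf <;> omega

lemma pvDigs_bounds : ∀ (f : Nat) (n : Int), ∀ t ∈ pvDigs f n, 0 ≤ t ∧ t < 8 := by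
  intro f
  induction f with
  | zero => intro n t ht; simp [pvDigs] at ht
  | succ f ih =>
    intro n t ht
    simp only [pvDigs] at ht
    have hb := pvTmp_bounds n
    generalize hT : (if PySem.Int.mod n 9 = 8 then (5 : Int) else PySem.Int.mod n 9) = d at ht hb
    split_ifs at ht with h
    · simp at ht; subst ht; exact hb
    · rcases List.mem_append.mp ht with h' | h'
      · exact ih _ _ h'
      · simp at h'; subst h'; exact hb

lemma pvToChars_digit (t : Int) (h0 : 0 ≤ t) (h8 : t < 8) :
    PySem.Int.toChars t = [pvDChar t] := by
  interval_cases t <;> decide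

lemma pvOctStep_dchar (a t : Int) (h0 : 0 ≤ t) (h8 : t < 8) :
    pvOctStep a (pvDChar t) = a * 8 + t := by
  have : ((pvDChar t).toNat : Int) = 48 + t := by interval_cases t <;> decide
  simp [pvOctStep, this]

lemma pvALoop_toList : ∀ (f : Nat) (n : Int) (s : String),
    (pvALoop f n s).toList = (pvDigs f n).map pvDChar ++ s.toList := by
  intro f
  induction f with
  | zero => intro n s; simp [pvALoop, pvDigs]
  | succ f ih =>
    intro n s
    simp only [pvALoop, pvDigs]
    have hb := pvTmp_bounds n
    have hc : (PySem.Int.toStr (if PySem.Int.mod n 9 = 8 then (5 : Int) else PySem.Int.mod n 9) ++ s).toList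
        = pvDChar (if PySem.Int.mod n 9 = 8 then (5 : Int) else PySem.Int.mod n 9) :: s.toList := by
      rw [String.toList_append, PySem.Int.toList_toStr, pvToChars_digit _ hb.1 hb.2]
      simp
    generalize hT : (if PySem.Int.mod n 9 = 8 then (5 : Int) else PySem.Int.mod n 9) = d at hc ⊢
    split_ifs with h
    · simp [hc]
    · rw [ih, hc]
      simp

lemma pvParse_digs (f : Nat) (n : Int) :
    ((pvDigs f n).map pvDChar).foldl pvOctStep 0 = pvOctVal (pvDigs f n) := by
  rw [List.foldl_map]
  unfold pvOctVal
  apply PySem.List.foldl_congr_mem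
  intro a t ht
  exact pvOctStep_dchar a t (pvDigs_bounds f n t ht).1 (pvDigs_bounds f n t ht).2

-- A's value as the base-8 Horner value of its digit list
lemma pvA_val (n : Int) : octnovoct n = pvOctVal (pvDigs 20 n) := by
  rw [octnovoct, pvParseOct, pvALoop_toList]
  simpa using pvParse_digs 20 n

-- with enough fuel, A's digit list is B's raw digit list remapped
lemma pvDigs_eq_digits9 : ∀ (f : Nat) (n : Int), n < 9 ^ (f + 1) →
    pvDigs (f + 1) n = (pvDigits9 n).map (fun d => if d = 8 then (5 : Int) else d) := by
  intro f
  induction f with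
  | zero =>
    intro n hn
    have h9 : n < 9 := by simpa using hn
    rw [pvDigits9]
    simp [pvDigs, h9]
  | succ f ih =>
    intro n hn
    by_cases h9 : n < 9
    · rw [pvDigits9]; simp [pvDigs, h9]
    · have hfd : PySem.Int.floordiv n 9 < 9 ^ (f + 1) := by
        rw [PySem.Int.floordiv_eq_ediv_of_pos (by norm_num)]
        have h92 : (9 : Int) ^ (f + 1 + 1) = 9 ^ (f + 1) * 9 := by ring
        nlinarith [Int.ediv_mul_le n (show (9:Int) ≠ 0 by norm_num)]
      have hstep : pvDigs (f + 1 + 1) n = pvDigs (f + 1) (PySem.Int.floordiv n 9)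
          ++ [if PySem.Int.mod n 9 = 8 then (5 : Int) else PySem.Int.mod n 9] := by
        rw [pvDigs]; simp [h9]
      rw [hstep, pvDigits9, dif_neg h9, ih _ hfd]
      simp

-- enumerate-sum with powers of 8 equals the LSB-first polynomial value
lemma pvEnumSum (l : List Int) : ∀ (s : Nat),
    ((PySem.List.enumerate l (s : Int)).map (fun p => p.2 * 8 ^ p.1.toNat)).sum
      = 8 ^ s * pvPoly l := by
  induction l with
  | nil => intro s; simp [PySem.List.enumerate_nil, pvPoly]
  | cons d l ih =>
    intro s
    rw [PySem.List.enumerate_cons]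
    have hs1 : ((s : Int) + 1) = ((s + 1 : Nat) : Int) := by push_cast; ring
    simp only [List.map_cons, List.sum_cons, hs1, ih]
    have ht : ((s : Int)).toNat = s := by omega
    rw [ht]
    simp [pvPoly, pow_succ]
    ring

-- LSB-first value of the reversed list = MSB-first Horner value
lemma pvPoly_reverse (l : List Int) : pvPoly l.reverse = pvOctVal l := by
  induction l using List.reverseRecOn with
  | nil => simp [pvPoly, pvOctVal]
  | append_singleton l t ih =>
    rw [List.reverse_append]
    simp only [List.reverse_singleton, List.singleton_append, pvPoly, ih]
    simp [pvOctVal, List.foldl_append]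
    ring

-- ===== VERDICT (by name: the statement is the Claim_ definition above) =====
theorem octnovoct_spec : Claim_equal_octnovoct := by
  intro n hdom
  show octnovoct n = octnovoct_alt n
  have hn : n < 9 ^ 20 := by
    have : n ≤ 2147483648 := by
      simp [Dom_octnovoct, pvDomInt] at hdom
      omega
    calc n ≤ 2147483648 := this
      _ < 9 ^ 20 := by norm_num
  rw [pvA_val, octnovoct_alt]
  have hd := pvDigs_eq_digits9 19 n (by simpa using hn)
  simp only [hd]
  have := pvEnumSum ((pvDigits9 n).map (fun d => if d = 8 then (5 : Int) else d)).reverse 0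
  simp only [Nat.cast_zero] at this
  rw [this, pvPoly_reverse]
  simp
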